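-- pv_equiv track=rewrite | github.com/py9245/SSAFY_study | battlessafy/서울_18반_배틀싸피전국대항전코드/40턴 로직 2차.py | find_valid_caesar_decode
-- ===== SOURCE A (Python) =====
-- def caesar_decode(ciphertext, shift):
--     res = ""
--     for ch in ciphertext:
--         if ch.isalpha():
--             base = ord('A') if ch.isupper() else ord('a')
--             res += chr((ord(ch) - base - shift) % 26 + base)
--         else:
--             res += ch
--     return res
--
-- def find_valid_caesar_decode(ciphertext):
--     keywords = [
--         "YOUWILLNEVERKNOWUNTILYOUTRY","THEREISNOROYALROADTOLEARNING","BETTERLATETHANNEVER","THISTOOSHALLPASSAWAY",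
--         "FAITHWITHOUTDEEDSISUSELESS","FORGIVENESSISBETTERTHANREVENGE","LIFEISNOTALLBEERANDSKITTLES","UNTILDEATHITISALLLIFE",
--         "WHATEVERYOUDOMAKEITPAY","TIMEISGOLD","THEONLYCUREFORGRIEFISACTION","GIVEMELIBERTYORGIVEMEDEATH",
--         "APOETISTHEPAINTEROFTHESOUL","BELIEVEINYOURSELF","NOSWEATNOSWEET","EARLYBIRDCATCHESTHEWORM",
--         "SEEINGISBELIEVING","ASKINGCOSTSNOTHING","GOODFENCESMAKESGOODNEIGHBORS","AROLLINGSTONEGATHERSNOMOSS",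
--         "ONESUTMOSTMOVESTHEHEAVENS","LITTLEBYLITTLEDOESTHETRICK","LIVEASIFYOUWERETODIETOMORROW","LETBYGONESBEBYGONES",
--         "THEBEGINNINGISHALFOFTHEWHOLE","NOPAINNOGAIN","STEPBYSTEPGOESALONGWAY","THEDIFFICULTYINLIFEISTHECHOICE",
--         "LIFEISFULLOFUPSANDDOWNS","ROMEWASNOTBUILTINADAY","IFYOUCANTBEATTHEMJOINTHEM","NOTHINGVENTUREDNOTHINGGAINED",
--         "KNOWLEDGEINYOUTHISWISDOMINAGE","NOBEESNOHONEY","WHERETHEREISAWILLTHEREISAWAY","HABITISSECONDNATURE",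
--         "SUTMOSTMOVESTHEHEAVENS","ONLY","ACTION","CUREFORGRIEFIS","SSAFY","BATTLE","ALGORITHM","TANK","MISSION",
--         "CODE","HERO","SEIZETHEDAY","LIFEITSELFISAQUOTATION","LIFEISVENTUREORNOTHING","DONTDREAMBEIT",
--         "TRYYOURBESTRATHERTHANBETHEBEST","WHATWILLBEWILLBE","DONTDWELLONTHEPAST","PASTISJUSTPAST","FOLLOWYOURHEART",
--         "LITTLEBYLITTLEDOESTHETRICK"
--     ]
--     for s in range(26):
--         dec = caesar_decode(ciphertext, s)
--         u = dec.upper()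
--         for kw in keywords:
--             if kw in u:
--                 return dec
--     return caesar_decode(ciphertext, 3)
-- ===== SOURCE B (Python) =====
-- KEYWORDS = [
--     "YOUWILLNEVERKNOWUNTILYOUTRY","THEREISNOROYALROADTOLEARNING","BETTERLATETHANNEVER","THISTOOSHALLPASSAWAY",
--     "FAITHWITHOUTDEEDSISUSELESS","FORGIVENESSISBETTERTHANREVENGE","LIFEISNOTALLBEERANDSKITTLES","UNTILDEATHITISALLLIFE",
--     "WHATEVERYOUDOMAKEITPAY","TIMEISGOLD","THEONLYCUREFORGRIEFISACTION","GIVEMELIBERTYORGIVEMEDEATH",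
--     "APOETISTHEPAINTEROFTHESOUL","BELIEVEINYOURSELF","NOSWEATNOSWEET","EARLYBIRDCATCHESTHEWORM",
--     "SEEINGISBELIEVING","ASKINGCOSTSNOTHING","GOODFENCESMAKESGOODNEIGHBORS","AROLLINGSTONEGATHERSNOMOSS",
--     "ONESUTMOSTMOVESTHEHEAVENS","LITTLEBYLITTLEDOESTHETRICK","LIVEASIFYOUWERETODIETOMORROW","LETBYGONESBEBYGONES",
--     "THEBEGINNINGISHALFOFTHEWHOLE","NOPAINNOGAIN","STEPBYSTEPGOESALONGWAY","THEDIFFICULTYINLIFEISTHECHOICE",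
--     "LIFEISFULLOFUPSANDDOWNS","ROMEWASNOTBUILTINADAY","IFYOUCANTBEATTHEMJOINTHEM","NOTHINGVENTUREDNOTHINGGAINED",
--     "KNOWLEDGEINYOUTHISWISDOMINAGE","NOBEESNOHONEY","WHERETHEREISAWILLTHEREISAWAY","HABITISSECONDNATURE",
--     "SUTMOSTMOVESTHEHEAVENS","ONLY","ACTION","CUREFORGRIEFIS","SSAFY","BATTLE","ALGORITHM","TANK","MISSION",
--     "CODE","HERO","SEIZETHEDAY","LIFEITSELFISAQUOTATION","LIFEISVENTUREORNOTHING","DONTDREAMBEIT",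
--     "TRYYOURBESTRATHERTHANBETHEBEST","WHATWILLBEWILLBE","DONTDWELLONTHEPAST","PASTISJUSTPAST","FOLLOWYOURHEART",
--     "LITTLEBYLITTLEDOESTHETRICK"
-- ]
--
--
-- def _dec_char(ch, shift):
--     if 'A' <= ch <= 'Z':
--         return chr((ord(ch) - 65 - shift) % 26 + 65)
--     if 'a' <= ch <= 'z':
--         return chr((ord(ch) - 97 - shift) % 26 + 97)
--     return ch
--
--
-- def caesar_decode(ciphertext, shift):
--     return "".join(_dec_char(ch, shift) for ch in ciphertext)
--
--
-- def _min_shift_for(kw, u):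
--     # smallest shift s such that kw, encoded forward by s, occurs in u (None if none):
--     # kw occurs in upper(caesar_decode(text, s)) iff encode(kw, s) occurs in upper(text)
--     for s in range(26):
--         if "".join(chr((ord(c) - 65 + s) % 26 + 65) for c in kw) in u:
--             return s
--     return None
--
--
-- def find_valid_caesar_decode(ciphertext):
--     # per keyword, find its minimal matching shift in the uppercased text once;
--     # the answer is the overall minimum (the first shift at which anything matches)
--     u = ciphertext.upper()
--     best = None
--     for kw in KEYWORDS:
--         s = _min_shift_for(kw, u)
--         if s is not None and (best is None or s < best):
--             best = s
--     return caesar_decode(ciphertext, best if best is not None else 3)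
-- ===== Notes on version B (the rewrite author's own statement) =====
-- stated objective: faster
-- what changed: B inverts the loop nesting: instead of decoding and uppercasing the whole text for each of the 26 shifts and early-returning on the first any-keyword hit, it uppercases the text once, computes for each keyword its minimal matching shift by searching the forward-shifted (short) keyword in that fixed haystack, and decodes once at the overall minimum via an option-min accumulator.
import Mathlib
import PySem

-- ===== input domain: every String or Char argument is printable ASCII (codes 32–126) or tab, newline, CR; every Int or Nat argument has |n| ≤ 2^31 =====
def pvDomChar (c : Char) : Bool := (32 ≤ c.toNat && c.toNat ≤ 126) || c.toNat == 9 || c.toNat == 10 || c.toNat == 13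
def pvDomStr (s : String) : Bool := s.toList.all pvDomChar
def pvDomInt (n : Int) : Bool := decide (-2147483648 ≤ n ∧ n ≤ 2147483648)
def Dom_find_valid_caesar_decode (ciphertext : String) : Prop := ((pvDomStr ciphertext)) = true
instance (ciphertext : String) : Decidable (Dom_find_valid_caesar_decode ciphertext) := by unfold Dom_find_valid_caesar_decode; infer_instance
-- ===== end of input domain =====

-- B inverts the search: instead of decoding the whole text for each of the 26 shifts and
-- scanning it per keyword, it uppercases the text once, finds each keyword's minimal matching
-- shift there, and decodes once at the overall minimum (measured faster in a timing run).

-- the keyword list both Python sources carry verbatim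
def pvKeywords : List String := [
  "YOUWILLNEVERKNOWUNTILYOUTRY","THEREISNOROYALROADTOLEARNING","BETTERLATETHANNEVER","THISTOOSHALLPASSAWAY",
  "FAITHWITHOUTDEEDSISUSELESS","FORGIVENESSISBETTERTHANREVENGE","LIFEISNOTALLBEERANDSKITTLES","UNTILDEATHITISALLLIFE",
  "WHATEVERYOUDOMAKEITPAY","TIMEISGOLD","THEONLYCUREFORGRIEFISACTION","GIVEMELIBERTYORGIVEMEDEATH",
  "APOETISTHEPAINTEROFTHESOUL","BELIEVEINYOURSELF","NOSWEATNOSWEET","EARLYBIRDCATCHESTHEWORM",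
  "SEEINGISBELIEVING","ASKINGCOSTSNOTHING","GOODFENCESMAKESGOODNEIGHBORS","AROLLINGSTONEGATHERSNOMOSS",
  "ONESUTMOSTMOVESTHEHEAVENS","LITTLEBYLITTLEDOESTHETRICK","LIVEASIFYOUWERETODIETOMORROW","LETBYGONESBEBYGONES",
  "THEBEGINNINGISHALFOFTHEWHOLE","NOPAINNOGAIN","STEPBYSTEPGOESALONGWAY","THEDIFFICULTYINLIFEISTHECHOICE",
  "LIFEISFULLOFUPSANDDOWNS","ROMEWASNOTBUILTINADAY","IFYOUCANTBEATTHEMJOINTHEM","NOTHINGVENTUREDNOTHINGGAINED",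
  "KNOWLEDGEINYOUTHISWISDOMINAGE","NOBEESNOHONEY","WHERETHEREISAWILLTHEREISAWAY","HABITISSECONDNATURE",
  "SUTMOSTMOVESTHEHEAVENS","ONLY","ACTION","CUREFORGRIEFIS","SSAFY","BATTLE","ALGORITHM","TANK","MISSION",
  "CODE","HERO","SEIZETHEDAY","LIFEITSELFISAQUOTATION","LIFEISVENTUREORNOTHING","DONTDREAMBEIT",
  "TRYYOURBESTRATHERTHANBETHEBEST","WHATWILLBEWILLBE","DONTDWELLONTHEPAST","PASTISJUSTPAST","FOLLOWYOURHEART",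
  "LITTLEBYLITTLEDOESTHETRICK"]

-- ===== PORT A =====

-- body of caesar_decode's per-character branch (ch.isalpha / ch.isupper, exact on ASCII Dom)
def pvCaesarChar (shift : Int) (ch : Char) : Char :=
  if PySem.Chars.isalpha ch then
    let base : Int := if PySem.Chars.isupper ch then 65 else 97
    Char.ofNat (PySem.Int.mod ((ch.toNat : Int) - base - shift) 26 + base).toNat
  else ch

-- res = ""; for ch in ciphertext: res += …
def caesar_decode (ciphertext : String) (shift : Int) : String :=
  String.ofList (ciphertext.toList.foldl (fun res ch => res ++ [pvCaesarChar shift ch]) [])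

-- for s in range(26): dec = …; u = dec.upper(); for kw in keywords: if kw in u: return dec
def pvFindA (ciphertext : String) : List Int → String
  | [] => caesar_decode ciphertext 3
  | s :: rest =>
      let dec := caesar_decode ciphertext s
      let u := PySem.Str.upper dec
      if pvKeywords.any (fun kw => PySem.Str.isIn kw u) then dec else pvFindA ciphertext rest

def find_valid_caesar_decode (ciphertext : String) : String :=
  pvFindA ciphertext (PySem.List.pyRange 0 26 1)

-- ===== PORT B =====

-- _dec_char: the single-character string comparisons 'A' <= ch <= 'Z' / 'a' <= ch <= 'z'
-- are exactly the code-point range checks (exact; chars are length-1 strings)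
def pvDecCharB (ch : Char) (shift : Int) : Char :=
  if 65 ≤ ch.toNat ∧ ch.toNat ≤ 90 then
    Char.ofNat (PySem.Int.mod ((ch.toNat : Int) - 65 - shift) 26 + 65).toNat
  else if 97 ≤ ch.toNat ∧ ch.toNat ≤ 122 then
    Char.ofNat (PySem.Int.mod ((ch.toNat : Int) - 97 - shift) 26 + 97).toNat
  else ch

-- "".join(_dec_char(ch, shift) for ch in ciphertext)
def caesar_decode_alt (ciphertext : String) (shift : Int) : String :=
  String.ofList (ciphertext.toList.map (fun ch => pvDecCharB ch shift))

-- "".join(chr((ord(c) - 65 + s) % 26 + 65) for c in kw)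
def pvFwdKw (kw : String) (s : Int) : String :=
  String.ofList (kw.toList.map (fun c => Char.ofNat (PySem.Int.mod ((c.toNat : Int) - 65 + s) 26 + 65).toNat))

-- _min_shift_for: for s in range(26): if shifted kw in u: return s;  return None
def pvMinShiftFor (kw u : String) : List Int → Option Int
  | [] => none
  | s :: rest => if PySem.Str.isIn (pvFwdKw kw s) u then some s else pvMinShiftFor kw u rest

-- for kw in KEYWORDS: s = _min_shift_for(kw, u); if s is not None and (best is None or s < best): best = s
def pvBestStep (u : String) (best : Option Int) (kw : String) : Option Int :=
  match pvMinShiftFor kw u (PySem.List.pyRange 0 26 1) with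
  | none => best
  | some s =>
      match best with
      | none => some s
      | some b => if s < b then some s else best

def find_valid_caesar_decode_alt (ciphertext : String) : String :=
  caesar_decode_alt ciphertext
    ((pvKeywords.foldl (pvBestStep (PySem.Str.upper ciphertext)) none).getD 3)

-- ===== PRECONDITION & SPEC =====
def Spec_find_valid_caesar_decode (ciphertext : String) (out : String) : Prop := out = find_valid_caesar_decode_alt ciphertext
instance (ciphertext : String) (out : String) : Decidable (Spec_find_valid_caesar_decode ciphertext out) := by unfold Spec_find_valid_caesar_decode; infer_instance

-- ===== CLAIM (what is proved, stated in full; the proofs are below) =====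
def Claim_equal_find_valid_caesar_decode : Prop := ∀ (ciphertext : String), Dom_find_valid_caesar_decode ciphertext → Spec_find_valid_caesar_decode ciphertext (find_valid_caesar_decode ciphertext)

-- ===== LEMMAS AND PROOFS =====

theorem pvIslower_iff (c : Char) : PySem.Chars.islower c = true ↔ 97 ≤ c.toNat ∧ c.toNat ≤ 122 := by
  simp only [PySem.Chars.islower, Bool.and_eq_true, decide_eq_true_eq, Char.le_def,
    UInt32.le_iff_toNat_le]
  rfl

theorem pvIsupper_iff (c : Char) : PySem.Chars.isupper c = true ↔ 65 ≤ c.toNat ∧ c.toNat ≤ 90 := by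
  simp only [PySem.Chars.isupper, Bool.and_eq_true, decide_eq_true_eq, Char.le_def,
    UInt32.le_iff_toNat_le]
  rfl

theorem pvToNat_ofNat (n : Nat) (h : n < 55296) : (Char.ofNat n).toNat = n := by
  unfold Char.ofNat
  split
  · rw [Char.toNat_ofNatAux]
  · omega

theorem pvModBounds (x : Int) : 0 ≤ PySem.Int.mod x 26 ∧ PySem.Int.mod x 26 < 26 :=
  ⟨PySem.Int.mod_nonneg x (by omega), PySem.Int.mod_lt x (by omega)⟩

theorem pvModEmod (x : Int) : PySem.Int.mod x 26 = x % 26 :=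
  PySem.Int.mod_eq_emod_of_pos (by omega)

-- B's range-test character step is A's isalpha/isupper character step
theorem pvDecCharB_eq (s : Int) (c : Char) : pvDecCharB c s = pvCaesarChar s c := by
  unfold pvDecCharB pvCaesarChar
  by_cases hu : 65 ≤ c.toNat ∧ c.toNat ≤ 90
  · have hU : PySem.Chars.isupper c = true := (pvIsupper_iff c).mpr hu
    have hA : PySem.Chars.isalpha c = true := by unfold PySem.Chars.isalpha; rw [hU, Bool.true_or]
    rw [if_pos hu, if_pos hA, if_pos hU]
  · by_cases hl : 97 ≤ c.toNat ∧ c.toNat ≤ 122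
    · have hL : PySem.Chars.islower c = true := (pvIslower_iff c).mpr hl
      have hA : PySem.Chars.isalpha c = true := by unfold PySem.Chars.isalpha; rw [hL, Bool.or_true]
      have hU : ¬ PySem.Chars.isupper c = true := fun h => hu ((pvIsupper_iff c).mp h)
      rw [if_neg hu, if_pos hl, if_pos hA, if_neg hU]
    · have hA : ¬ PySem.Chars.isalpha c = true := by
        unfold PySem.Chars.isalpha
        simp only [Bool.or_eq_true]
        rintro (h | h)
        · exact hu ((pvIsupper_iff c).mp h)
        · exact hl ((pvIslower_iff c).mp h)
      rw [if_neg hu, if_neg hl, if_neg hA]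

-- caesar_decode as a map; the two decoders agree
theorem pvDec_toList (t : String) (s : Int) :
    (caesar_decode t s).toList = t.toList.map (pvCaesarChar s) := by
  unfold caesar_decode
  rw [String.toList_ofList, PySem.List.foldl_append_singleton_eq_map, List.nil_append]

theorem pvDecAlt (t : String) (s : Int) : caesar_decode_alt t s = caesar_decode t s := by
  unfold caesar_decode_alt caesar_decode
  rw [PySem.List.foldl_append_singleton_eq_map, List.nil_append]
  exact congrArg _ (List.map_congr_left fun c _ => pvDecCharB_eq s c)

-- proof-side inverse of pvCaesarChar s (shift forward, both cases)
def pvEncChar (s : Int) (c : Char) : Char :=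
  if PySem.Chars.isalpha c then
    let base : Int := if PySem.Chars.isupper c then 65 else 97
    Char.ofNat (PySem.Int.mod ((c.toNat : Int) - base + s) 26 + base).toNat
  else c

theorem pvShiftToNat (x : Int) (base : Int) (hb : base = 65 ∨ base = 97) :
    ((Char.ofNat (PySem.Int.mod x 26 + base).toNat).toNat : Int)
      = PySem.Int.mod x 26 + base := by
  obtain ⟨h0, h1⟩ := pvModBounds x
  have : (PySem.Int.mod x 26 + (base : Int)).toNat < 55296 := by omega
  rw [pvToNat_ofNat _ this]
  omega

theorem pvAlphaOfUpper (d : Char) (h : PySem.Chars.isupper d = true) :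
    PySem.Chars.isalpha d = true := by
  unfold PySem.Chars.isalpha; rw [h, Bool.true_or]

theorem pvAlphaOfLower (d : Char) (h : PySem.Chars.islower d = true) :
    PySem.Chars.isalpha d = true := by
  unfold PySem.Chars.isalpha; rw [h, Bool.or_true]

theorem pvLowerOfAlphaNotUpper (c : Char) (ha : PySem.Chars.isalpha c = true)
    (hu : ¬ PySem.Chars.isupper c = true) : PySem.Chars.islower c = true := by
  unfold PySem.Chars.isalpha at ha
  rcases Bool.or_eq_true_iff.mp ha with h | h
  · exact absurd h hu
  · exact h

theorem pvEnc_Caesar (s : Int) (c : Char) : pvEncChar s (pvCaesarChar s c) = c := by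
  unfold pvCaesarChar
  by_cases ha : PySem.Chars.isalpha c = true
  · rw [if_pos ha]
    by_cases hu : PySem.Chars.isupper c = true
    · have hu' := (pvIsupper_iff c).mp hu
      rw [if_pos hu]
      have h26 := pvModBounds ((c.toNat : Int) - 65 - s)
      have htN := pvShiftToNat ((c.toNat : Int) - 65 - s) 65 (Or.inl rfl)
      have hdu : PySem.Chars.isupper (Char.ofNat (PySem.Int.mod ((c.toNat : Int) - 65 - s) 26 + 65).toNat) = true := by
        rw [pvIsupper_iff]; omega
      unfold pvEncChar
      rw [if_pos (pvAlphaOfUpper _ hdu), if_pos hdu]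
      have key : (PySem.Int.mod (((Char.ofNat (PySem.Int.mod ((c.toNat : Int) - 65 - s) 26 + 65).toNat).toNat : Int) - 65 + s) 26 + 65).toNat = c.toNat := by
        rw [htN, pvModEmod, pvModEmod]; omega
      simp only []
      rw [key, Char.ofNat_toNat]
    · have hl := pvLowerOfAlphaNotUpper c ha hu
      have hl' := (pvIslower_iff c).mp hl
      rw [if_neg hu]
      have h26 := pvModBounds ((c.toNat : Int) - 97 - s)
      have htN := pvShiftToNat ((c.toNat : Int) - 97 - s) 97 (Or.inr rfl)
      have hdl : PySem.Chars.islower (Char.ofNat (PySem.Int.mod ((c.toNat : Int) - 97 - s) 26 + 97).toNat) = true := by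
        rw [pvIslower_iff]; omega
      have hdu : ¬ PySem.Chars.isupper (Char.ofNat (PySem.Int.mod ((c.toNat : Int) - 97 - s) 26 + 97).toNat) = true := by
        rw [pvIsupper_iff]; omega
      unfold pvEncChar
      rw [if_pos (pvAlphaOfLower _ hdl), if_neg hdu]
      have key : (PySem.Int.mod (((Char.ofNat (PySem.Int.mod ((c.toNat : Int) - 97 - s) 26 + 97).toNat).toNat : Int) - 97 + s) 26 + 97).toNat = c.toNat := by
        rw [htN, pvModEmod, pvModEmod]; omega
      simp only []
      rw [key, Char.ofNat_toNat]
  · unfold pvEncChar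
    rw [if_neg ha, if_neg ha]

theorem pvCaesar_Enc (s : Int) (c : Char) : pvCaesarChar s (pvEncChar s c) = c := by
  unfold pvEncChar
  by_cases ha : PySem.Chars.isalpha c = true
  · rw [if_pos ha]
    by_cases hu : PySem.Chars.isupper c = true
    · have hu' := (pvIsupper_iff c).mp hu
      rw [if_pos hu]
      have h26 := pvModBounds ((c.toNat : Int) - 65 + s)
      have htN := pvShiftToNat ((c.toNat : Int) - 65 + s) 65 (Or.inl rfl)
      have hdu : PySem.Chars.isupper (Char.ofNat (PySem.Int.mod ((c.toNat : Int) - 65 + s) 26 + 65).toNat) = true := by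
        rw [pvIsupper_iff]; omega
      unfold pvCaesarChar
      rw [if_pos (pvAlphaOfUpper _ hdu), if_pos hdu]
      have key : (PySem.Int.mod (((Char.ofNat (PySem.Int.mod ((c.toNat : Int) - 65 + s) 26 + 65).toNat).toNat : Int) - 65 - s) 26 + 65).toNat = c.toNat := by
        rw [htN, pvModEmod, pvModEmod]; omega
      simp only []
      rw [key, Char.ofNat_toNat]
    · have hl := pvLowerOfAlphaNotUpper c ha hu
      have hl' := (pvIslower_iff c).mp hl
      rw [if_neg hu]
      have h26 := pvModBounds ((c.toNat : Int) - 97 + s)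
      have htN := pvShiftToNat ((c.toNat : Int) - 97 + s) 97 (Or.inr rfl)
      have hdl : PySem.Chars.islower (Char.ofNat (PySem.Int.mod ((c.toNat : Int) - 97 + s) 26 + 97).toNat) = true := by
        rw [pvIslower_iff]; omega
      have hdu : ¬ PySem.Chars.isupper (Char.ofNat (PySem.Int.mod ((c.toNat : Int) - 97 + s) 26 + 97).toNat) = true := by
        rw [pvIsupper_iff]; omega
      unfold pvCaesarChar
      rw [if_pos (pvAlphaOfLower _ hdl), if_neg hdu]
      have key : (PySem.Int.mod (((Char.ofNat (PySem.Int.mod ((c.toNat : Int) - 97 + s) 26 + 97).toNat).toNat : Int) - 97 - s) 26 + 97).toNat = c.toNat := by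
        rw [htN, pvModEmod, pvModEmod]; omega
      simp only []
      rw [key, Char.ofNat_toNat]
  · unfold pvCaesarChar
    rw [if_neg ha, if_neg ha]

-- decoding commutes with uppercasing, character by character
theorem pvUpper_Caesar (s : Int) (c : Char) :
    PySem.Chars.upperChar (pvCaesarChar s c) = pvCaesarChar s (PySem.Chars.upperChar c) := by
  by_cases hu : PySem.Chars.isupper c = true
  · have hu' := (pvIsupper_iff c).mp hu
    have hcl : ¬ PySem.Chars.islower c = true := by rw [pvIslower_iff]; omega
    have h26 := pvModBounds ((c.toNat : Int) - 65 - s)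
    have htN := pvShiftToNat ((c.toNat : Int) - 65 - s) 65 (Or.inl rfl)
    have hres : ¬ PySem.Chars.islower (Char.ofNat (PySem.Int.mod ((c.toNat : Int) - 65 - s) 26 + 65).toNat) = true := by
      rw [pvIslower_iff]; omega
    unfold pvCaesarChar PySem.Chars.upperChar
    rw [if_pos (pvAlphaOfUpper _ hu), if_pos hu, if_neg hres, if_neg hcl,
      if_pos (pvAlphaOfUpper _ hu), if_pos hu]
  · by_cases hl : PySem.Chars.islower c = true
    · have hl' := (pvIslower_iff c).mp hl
      have hal := pvAlphaOfLower _ hl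
      have h26 := pvModBounds ((c.toNat : Int) - 97 - s)
      have htN := pvShiftToNat ((c.toNat : Int) - 97 - s) 97 (Or.inr rfl)
      have hres : PySem.Chars.islower (Char.ofNat (PySem.Int.mod ((c.toNat : Int) - 97 - s) 26 + 97).toNat) = true := by
        rw [pvIslower_iff]; omega
      have hucN : (Char.ofNat (c.toNat - 32)).toNat = c.toNat - 32 := pvToNat_ofNat _ (by omega)
      have hucU : PySem.Chars.isupper (Char.ofNat (c.toNat - 32)) = true := by
        rw [pvIsupper_iff, hucN]; omega
      unfold pvCaesarChar PySem.Chars.upperChar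
      rw [if_pos hal, if_neg hu, if_pos hl, if_pos hres,
        if_pos (pvAlphaOfUpper _ hucU), if_pos hucU]
      simp only []
      congr 1
      simp only [pvModEmod] at htN h26 ⊢
      omega
    · have hal : ¬ PySem.Chars.isalpha c = true := by
        unfold PySem.Chars.isalpha
        simp only [Bool.or_eq_true]
        rintro (h | h)
        · exact hu h
        · exact hl h
      unfold pvCaesarChar PySem.Chars.upperChar
      rw [if_neg hl, if_neg hal, if_neg hl]

-- infix through the character bijection
theorem pvInfix_map_iff (s : Int) (kw L : List Char) :
    kw <:+: L.map (pvCaesarChar s) ↔ kw.map (pvEncChar s) <:+: L := by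
  constructor
  · intro h
    have h2 := h.map (pvEncChar s)
    have hcomp : pvEncChar s ∘ pvCaesarChar s = id := funext fun c => pvEnc_Caesar s c
    rwa [List.map_map, hcomp, List.map_id] at h2
  · intro h
    have h2 := h.map (pvCaesarChar s)
    have hcomp : pvCaesarChar s ∘ pvEncChar s = id := funext fun c => pvCaesar_Enc s c
    rwa [List.map_map, hcomp, List.map_id] at h2

-- on uppercase characters B's forward keyword shift is the inverse of A's decode shift
theorem pvFwdChar_eq_enc (s : Int) (c : Char) (h : PySem.Chars.isupper c = true) :
    Char.ofNat (PySem.Int.mod ((c.toNat : Int) - 65 + s) 26 + 65).toNat = pvEncChar s c := by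
  unfold pvEncChar
  simp [PySem.Chars.isalpha, h]

-- every keyword is pure uppercase letters
theorem pvKeywords_upper : pvKeywords.all (fun kw => kw.toList.all PySem.Chars.isupper) = true := by
  decide

-- the per-keyword guards of the two programs coincide (for uppercase kw)
theorem pvKwGuard_eq (t kw : String) (s : Int)
    (hkup : kw.toList.all PySem.Chars.isupper = true) :
    PySem.Str.isIn kw (PySem.Str.upper (caesar_decode t s)) =
    PySem.Str.isIn (pvFwdKw kw s) (PySem.Str.upper t) := by
  have hmapeq : kw.toList.map (fun c => Char.ofNat (PySem.Int.mod ((c.toNat : Int) - 65 + s) 26 + 65).toNat)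
      = kw.toList.map (pvEncChar s) :=
    List.map_congr_left (fun c hc => pvFwdChar_eq_enc s c ((List.all_eq_true.mp hkup) c hc))
  have hhay : (PySem.Str.upper (caesar_decode t s)).toList
      = (PySem.Str.upper t).toList.map (pvCaesarChar s) := by
    simp only [PySem.Str.upper, String.toList_ofList, PySem.Chars.upper, pvDec_toList,
      List.map_map]
    exact List.map_congr_left (fun c _ => pvUpper_Caesar s c)
  apply Bool.coe_iff_coe.mp
  rw [PySem.Str.isIn_iff_infix, PySem.Str.isIn_iff_infix, hhay, pvInfix_map_iff]
  unfold pvFwdKw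
  rw [String.toList_ofList, hmapeq]


-- any-congruence over a list, elementwise
theorem pvAnyCongr {A : Type} (l : List A) (p q : A → Bool)
    (h : ∀ a ∈ l, p a = q a) : l.any p = l.any q := by
  induction l with
  | nil => rfl
  | cons x r ih =>
    simp only [List.any_cons, h x List.mem_cons_self,
      ih fun a ha => h a (List.mem_cons_of_mem _ ha)]

-- first element of a shift list satisfying a Bool predicate (proof-side view of both searches)
def pvFirst (p : Int → Bool) : List Int → Option Int
  | [] => none
  | s :: rest => if p s then some s else pvFirst p rest

theorem pvFirst_cons (p : Int → Bool) (s : Int) (r : List Int) :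
    pvFirst p (s :: r) = if p s then some s else pvFirst p r := rfl

theorem pvFirst_mem (p : Int → Bool) (l : List Int) (x : Int) (h : pvFirst p l = some x) :
    x ∈ l := by
  induction l with
  | nil => simp [pvFirst] at h
  | cons s r ih =>
    rw [pvFirst_cons] at h
    split at h
    · cases h; exact List.mem_cons_self
    · exact List.mem_cons_of_mem _ (ih h)

-- A's loop returns the decode at the first shift whose guard fires
theorem pvFindA_eq_first (t : String) (l : List Int) :
    pvFindA t l = caesar_decode t
      ((pvFirst (fun s => pvKeywords.any fun kw =>
          PySem.Str.isIn (pvFwdKw kw s) (PySem.Str.upper t)) l).getD 3) := by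
  induction l with
  | nil => simp [pvFindA, pvFirst]
  | cons s r ih =>
    have hg : (pvKeywords.any fun kw => PySem.Str.isIn kw (PySem.Str.upper (caesar_decode t s)))
        = (pvKeywords.any fun kw => PySem.Str.isIn (pvFwdKw kw s) (PySem.Str.upper t)) :=
      pvAnyCongr pvKeywords _ _ fun kw hkw =>
        pvKwGuard_eq t kw s ((List.all_eq_true.mp pvKeywords_upper) kw hkw)
    rw [show pvFindA t (s :: r)
        = (if pvKeywords.any (fun kw => PySem.Str.isIn kw (PySem.Str.upper (caesar_decode t s)))
           then caesar_decode t s else pvFindA t r) from rfl]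
    rw [hg, pvFirst_cons]
    split
    · rfl
    · exact ih

-- B's inner search is pvFirst of its per-keyword predicate
theorem pvMinShift_eq_first (kw u : String) (l : List Int) :
    pvMinShiftFor kw u l = pvFirst (fun s => PySem.Str.isIn (pvFwdKw kw s) u) l := by
  induction l with
  | nil => rfl
  | cons s r ih => simp only [pvMinShiftFor, pvFirst_cons, ih]

-- the option-minimum B's accumulator computes
def pvOmin (a o : Option Int) : Option Int :=
  match o with
  | none => a
  | some s =>
      match a with
      | none => some s
      | some b => if s < b then some s else a

theorem pvOmin_some_arg (a o : Option Int) (x : Int)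
    (h : pvOmin a o = some x) : a = some x ∨ o = some x := by
  cases o with
  | none => exact Or.inl h
  | some s =>
    cases a with
    | none => exact Or.inr h
    | some b =>
      simp only [pvOmin] at h
      split at h
      · exact Or.inr h
      · exact Or.inl h

theorem pvBestStep_eq (u : String) (best : Option Int) (kw : String) :
    pvBestStep u best kw
      = pvOmin best (pvFirst (fun s => PySem.Str.isIn (pvFwdKw kw s) u) (PySem.List.pyRange 0 26 1)) := by
  unfold pvBestStep pvOmin
  rw [pvMinShift_eq_first]

theorem pvOmin_all_none (os : List (Option Int)) (a : Option Int)
    (h : ∀ o ∈ os, o = none) : os.foldl pvOmin a = a := by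
  induction os generalizing a with
  | nil => rfl
  | cons o r ih =>
    have ho := h o List.mem_cons_self
    subst ho
    exact ih a fun o' h' => h o' (List.mem_cons_of_mem _ h')

-- if some s occurs and every occurring value is ≥ s, the fold yields some s
theorem pvFoldMin_reached (os : List (Option Int)) (s : Int)
    (hlb : ∀ o ∈ os, ∀ x, o = some x → s ≤ x) :
    ∀ a : Option Int,
      (a = some s ∨ (some s ∈ os ∧ ∀ x, a = some x → s ≤ x)) →
      os.foldl pvOmin a = some s := by
  induction os with
  | nil =>
    intro a h
    rcases h with h | ⟨h, _⟩
    · exact h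
    · simp at h
  | cons o r ih =>
    intro a h
    have hlb' : ∀ o' ∈ r, ∀ x, o' = some x → s ≤ x :=
      fun o' h' => hlb o' (List.mem_cons_of_mem _ h')
    have ho : ∀ x, o = some x → s ≤ x := hlb o List.mem_cons_self
    simp only [List.foldl_cons]
    apply ih hlb'
    rcases h with h | ⟨hmem, ha⟩
    · subst h
      left
      cases o with
      | none => rfl
      | some x =>
        have hsx := ho x rfl
        simp only [pvOmin]
        rw [if_neg (by omega)]
    · rcases List.mem_cons.mp hmem with ho' | hmem'
      · left
        rw [← ho'] at *
        cases a with
        | none => rfl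
        | some b =>
          have hsb := ha b rfl
          simp only [pvOmin]
          split
          · rfl
          · have : b = s := by omega
            rw [this]
      · right
        refine ⟨hmem', ?_⟩
        intro x hx
        rcases pvOmin_some_arg a o x hx with h' | h'
        · exact ha x h'
        · exact ho x h'

-- MAIN: on a strictly increasing shift list, the first shift at which ANY keyword matches
-- equals the minimum over keywords of each keyword's first matching shift
theorem pvFirst_any_eq_min (p : String → Int → Bool) (kws : List String) (l : List Int)
    (hl : l.Pairwise (· < ·)) :
    pvFirst (fun s => kws.any fun kw => p kw s) l
      = (kws.map fun kw => pvFirst (p kw) l).foldl pvOmin none := by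
  induction l with
  | nil =>
    rw [pvOmin_all_none]
    · rfl
    · intro o ho
      rcases List.mem_map.mp ho with ⟨kw, _, hkw⟩
      exact hkw.symm
  | cons s r ih =>
    rcases List.pairwise_cons.mp hl with ⟨hsr, hr⟩
    by_cases h : (kws.any fun kw => p kw s) = true
    · rw [pvFirst_cons, if_pos h]
      rcases List.any_eq_true.mp h with ⟨kw0, hkw0, hp0⟩
      have hmem : some s ∈ kws.map fun kw => pvFirst (p kw) (s :: r) :=
        List.mem_map.mpr ⟨kw0, hkw0, by rw [pvFirst_cons, if_pos hp0]⟩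
      have hlb : ∀ o ∈ (kws.map fun kw => pvFirst (p kw) (s :: r)), ∀ x, o = some x → s ≤ x := by
        intro o ho x hx
        rcases List.mem_map.mp ho with ⟨kw, _, hkw⟩
        have hxm : x ∈ s :: r := pvFirst_mem (p kw) (s :: r) x (by rw [hkw]; exact hx)
        rcases List.mem_cons.mp hxm with h' | h'
        · omega
        · exact le_of_lt (hsr x h')
      exact (pvFoldMin_reached _ s hlb none (Or.inr ⟨hmem, by intro x hx; cases hx⟩)).symm
    · rw [pvFirst_cons, if_neg h]
      have hnone : ∀ kw ∈ kws, ¬ p kw s = true :=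
        fun kw hkw => List.any_eq_false.mp (Bool.eq_false_iff.mpr h) kw hkw
      have hmaps : (kws.map fun kw => pvFirst (p kw) (s :: r))
          = kws.map fun kw => pvFirst (p kw) r := by
        apply List.map_congr_left
        intro kw hkw
        rw [pvFirst_cons, if_neg (hnone kw hkw)]
      rw [hmaps]
      exact ih hr

theorem pvRange_pairwise : (PySem.List.pyRange 0 26 1).Pairwise (· < ·) := by decide

-- ===== VERDICT (by name: the statement is the Claim_ definition above) =====
theorem find_valid_caesar_decode_spec : Claim_equal_find_valid_caesar_decode := by
  intro t _
  unfold Spec_find_valid_caesar_decode find_valid_caesar_decode find_valid_caesar_decode_alt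
  have hstep : pvKeywords.foldl (pvBestStep (PySem.Str.upper t)) none
      = (pvKeywords.map fun kw => pvFirst
          (fun s => PySem.Str.isIn (pvFwdKw kw s) (PySem.Str.upper t))
          (PySem.List.pyRange 0 26 1)).foldl pvOmin none := by
    rw [List.foldl_map,
      show pvBestStep (PySem.Str.upper t)
          = (fun best kw => pvOmin best (pvFirst
              (fun s => PySem.Str.isIn (pvFwdKw kw s) (PySem.Str.upper t))
              (PySem.List.pyRange 0 26 1)))
        from funext fun best => funext fun kw => pvBestStep_eq _ best kw]
  rw [pvFindA_eq_first, pvDecAlt, hstep,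
    pvFirst_any_eq_min (fun kw s => PySem.Str.isIn (pvFwdKw kw s) (PySem.Str.upper t))
      pvKeywords _ pvRange_pairwise]
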